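-- pv_equiv track=rewrite | github.com/M1troll/Ciphers | Cardano#.py | insert_message
-- ===== SOURCE A (Python) =====
-- def key_card():
--     card = [[0, 1, 1, 1, 1, 1, 1, 1],
--             [1, 1, 0, 0, 1, 1, 0, 1],
--             [1, 1, 1, 1, 1, 1, 1, 1],
--             [1, 0, 1, 1, 0, 1, 1, 0],
--             [1, 1, 0, 1, 1, 1, 1, 0],
--             [1, 1, 1, 0, 1, 0, 1, 0],
--             [1, 1, 0, 1, 1, 1, 1, 1],
--             [1, 0, 1, 1, 1, 0, 0, 1]]
--     return card
--
-- def rotate_90(data, times=1):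
--     rot_data = []
--
--     for t in range(times):
--         m = len(data)
--         n = len(data[0])
--         rev_data = data[::-1]
--         rot_data = [[rev_data[j][i] for j in range(m)] for i in range(n)]
--         data = rot_data
--
--     return rot_data
--
-- def insert_message(message, box):
--     message += '✸'
--     card = key_card()
--     i, r, completed = 0, 0, False
--
--     while not completed:
--         for x in range(8):
--             if i >= len(message):
--                 completed = True
--                 break
--
--             for y in range(8):
--                 if card[x][y] == 0:
--                     box[x][y] = message[i]
--                     i += 1
--                     if i == len(message):
--                         completed = True
--                         break
--
--         if not completed:
--             r += 1
--             if r == 4: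
--                 break
--             card = rotate_90(card)
--
--     return box
-- ===== SOURCE B (Python) =====
-- # B: precompute the flat fill order (zeros of the four grille orientations),
-- # then fill with one zip loop.  Mutates box in place like A.
--
-- CARD = [[0, 1, 1, 1, 1, 1, 1, 1],
--         [1, 1, 0, 0, 1, 1, 0, 1],
--         [1, 1, 1, 1, 1, 1, 1, 1],
--         [1, 0, 1, 1, 0, 1, 1, 0],
--         [1, 1, 0, 1, 1, 1, 1, 0],
--         [1, 1, 1, 0, 1, 0, 1, 0],
--         [1, 1, 0, 1, 1, 1, 1, 1],
--         [1, 0, 1, 1, 1, 0, 0, 1]]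
--
--
-- def _positions():
--     """(row, col) of every hole, over the four grille orientations."""
--     positions = []
--     card = CARD
--     for _ in range(4):
--         for x, row in enumerate(card):
--             for y, v in enumerate(row):
--                 if v == 0:
--                     positions.append((x, y))
--         card = [list(col) for col in zip(*card[::-1])]  # rotate 90° cw
--     return positions
--
--
-- def insert_message(message, box):
--     msg = message + '✸'
--     for (x, y), ch in zip(_positions(), msg):
--         box[x][y] = ch
--     return box
-- ===== Notes on version B (the rewrite author's own statement) =====
-- stated objective: simpler
-- what changed: B precomputes the flat list of hole positions of the four grille orientations once, then fills the box with a single zip loop, replacing A's interleaved rotate-and-scan state machine with i/r/completed flags and early breaks.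
import Mathlib
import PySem

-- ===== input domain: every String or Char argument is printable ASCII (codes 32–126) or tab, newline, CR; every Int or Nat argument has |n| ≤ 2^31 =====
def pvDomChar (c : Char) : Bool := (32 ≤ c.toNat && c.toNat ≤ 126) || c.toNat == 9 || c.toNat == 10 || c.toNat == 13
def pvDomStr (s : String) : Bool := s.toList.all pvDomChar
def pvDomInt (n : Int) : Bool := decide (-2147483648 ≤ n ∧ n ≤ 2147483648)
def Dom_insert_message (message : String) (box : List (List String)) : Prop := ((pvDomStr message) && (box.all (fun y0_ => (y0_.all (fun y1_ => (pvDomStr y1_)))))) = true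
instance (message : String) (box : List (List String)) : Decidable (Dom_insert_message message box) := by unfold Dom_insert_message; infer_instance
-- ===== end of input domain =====

-- B precomputes the flat list of hole positions of the four grille orientations and fills it
-- with one zip loop, instead of A's interleaved rotate-and-scan state machine (i/r/completed flags).
-- Both Pythons mutate `box` in place identically; the equivalence proved is about the return value.

-- ===== PORT A =====

-- box[x][y] = s  (in-range by Pre_; List.set is a no-op out of range)
def setCell (b : List (List String)) (x y : Nat) (s : String) : List (List String) :=
  b.set x ((b.getD x []).set y s)

def keyCard : List (List Int) :=
  [[0, 1, 1, 1, 1, 1, 1, 1],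
   [1, 1, 0, 0, 1, 1, 0, 1],
   [1, 1, 1, 1, 1, 1, 1, 1],
   [1, 0, 1, 1, 0, 1, 1, 0],
   [1, 1, 0, 1, 1, 1, 1, 0],
   [1, 1, 1, 0, 1, 0, 1, 0],
   [1, 1, 0, 1, 1, 1, 1, 1],
   [1, 0, 1, 1, 1, 0, 0, 1]]

-- rotate_90(data, times): for t in range(times): rev = data[::-1]; rot = [[rev[j][i] …]]; data = rot
def rotate_90A (data : List (List Int)) (times : Nat) : List (List Int) :=
  ((List.range times).foldl (fun (st : List (List Int) × List (List Int)) _ =>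
      let data := st.1
      let m := data.length
      let n := (data.getD 0 []).length
      let rev := data.reverse
      let rot := (List.range n).map (fun i => (List.range m).map (fun j => (rev.getD j []).getD i 0))
      (rot, rot)) (data, [])).2

-- the inner `for y in range(8)` loop of A (cx = card[x]); returns (i, box, completed)
def aRow (cx : List Int) (msg : List Char) (x : Nat) :
    List Nat → Nat → List (List String) → Nat × List (List String) × Bool
  | [], i, box => (i, box, false)
  | y :: ys, i, box =>
    if cx.getD y 0 == 0 then
      let box' := setCell box x y (String.mk [msg.getD i ' '])
      if i + 1 == msg.length then (i + 1, box', true)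
      else aRow cx msg x ys (i + 1) box'
    else aRow cx msg x ys i box

-- the `for x in range(8)` loop of A, with its `if i >= len(message)` top check
def aRows (card : List (List Int)) (msg : List Char) :
    List Nat → Nat → List (List String) → Nat × List (List String) × Bool
  | [], i, box => (i, box, false)
  | x :: xs, i, box =>
    if msg.length ≤ i then (i, box, true)
    else
      match aRow (card.getD x []) msg x (List.range 8) i box with
      | (i', box', true) => (i', box', true)
      | (i', box', false) => aRows card msg xs i' box'

-- the `while not completed` loop; it runs at most 4 - r times (r == 4 breaks), fuel = 4 covers it
def aLoop (msg : List Char) : Nat → List (List Int) → Nat → Nat → List (List String) → List (List String)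
  | 0, _, _, _, box => box
  | fuel + 1, card, i, r, box =>
    match aRows card msg (List.range 8) i box with
    | (_, box', true) => box'
    | (i', box', false) =>
      if r + 1 == 4 then box'
      else aLoop msg fuel (rotate_90A card 1) i' (r + 1) box'

def insert_message (message : String) (box : List (List String)) : List (List String) :=
  aLoop (message.toList ++ ['✸']) 4 keyCard 0 0 box

-- ===== PORT B =====

-- card = [list(col) for col in zip(*card[::-1])]: the card is rectangular, so zip(*rev) is
-- one row per column index of rev's first row
def rotB (c : List (List Int)) : List (List Int) :=
  let rev := c.reverse
  (List.range (rev.headD []).length).map (fun i => rev.map (fun row => row.getD i 0))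

-- _positions(): the (x, y) of every 0 over the four orientations, row-major
def posB : List (Nat × Nat) :=
  ((List.range 4).foldl (fun (st : List (Nat × Nat) × List (List Int)) _ =>
      (st.1 ++ st.2.zipIdx.flatMap (fun rx =>
          rx.1.zipIdx.filterMap (fun vy => if vy.1 == 0 then some (rx.2, vy.2) else none)),
       rotB st.2)) ([], keyCard)).1

def insert_message_alt (message : String) (box : List (List String)) : List (List String) :=
  let msg := message.toList ++ ['✸']
  (posB.zip msg).foldl (fun b pc => setCell b pc.1.1 pc.1.2 (String.mk [pc.2])) box

-- ===== PRECONDITION & SPEC =====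
-- pvHoles is the (row, col) of every hole of the key card over its four orientations, in the
-- order the cipher fills them (a fixed table of the grille, written out as a literal).
def pvHoles : List (Nat × Nat) := [(0, 0), (1, 2), (1, 3), (1, 6), (3, 1), (3, 4), (3, 7), (4, 2), (4, 7), (5, 3), (5, 5), (5, 7), (6, 2), (7, 1), (7, 5), (7, 6), (0, 7), (1, 0), (1, 4), (2, 1), (2, 3), (2, 6), (3, 2), (3, 6), (4, 4), (5, 0), (5, 2), (6, 0), (6, 6), (7, 2), (7, 3), (7, 4), (0, 1), (0, 2), (0, 6), (1, 5), (2, 0), (2, 2), (2, 4), (3, 0), (3, 5), (4, 0), (4, 3), (4, 6), (6, 1), (6, 4), (6, 5), (7, 7), (0, 3), (0, 4), (0, 5), (1, 1), (1, 7), (2, 5), (2, 7), (3, 3), (4, 1), (4, 5), (5, 1), (5, 4), (5, 6), (6, 3), (6, 7), (7, 0)]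

-- Exactly the inputs on which A returns: message+'✸' has length |message|+1, A writes its
-- characters into the first |message|+1 hole cells (at most all 64), and raises IndexError
-- iff one of those cells is missing from box.
def Pre_insert_message (message : String) (box : List (List String)) : Prop :=
  ∀ p ∈ pvHoles.take (message.toList.length + 1),
    p.1 < box.length ∧ p.2 < (box.getD p.1 []).length
instance (message : String) (box : List (List String)) : Decidable (Pre_insert_message message box) := by
  unfold Pre_insert_message; infer_instance

def pvWitness_insert_message : String × List (List String) :=
  ("hi", List.replicate 8 (List.replicate 8 "."))

def Spec_insert_message (message : String) (box : List (List String)) (out : List (List String)) : Prop := out = insert_message_alt message box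
instance (message : String) (box : List (List String)) (out : List (List String)) : Decidable (Spec_insert_message message box out) := by unfold Spec_insert_message; infer_instance

-- ===== CLAIM (what is proved, stated in full; the proofs are below) =====
def Claim_equal_insert_message : Prop := ∀ (message : String) (box : List (List String)), Dom_insert_message message box → Pre_insert_message message box → Spec_insert_message message box (insert_message message box)

-- ===== LEMMAS AND PROOFS =====

-- B's fill loop as a named function (proof vocabulary only)
def fill (box : List (List String)) (l : List ((Nat × Nat) × Char)) : List (List String) :=
  l.foldl (fun b pc => setCell b pc.1.1 pc.1.2 (String.mk [pc.2])) box

-- hole positions of rows xs of card, row-major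
def zrow (cx : List Int) (ys : List Nat) : List Nat := ys.filter (fun y => cx.getD y 0 == 0)

def zerosOf (card : List (List Int)) (xs : List Nat) : List (Nat × Nat) :=
  xs.flatMap (fun x => (zrow (card.getD x []) (List.range 8)).map (fun y => (x, y)))

-- hole positions of `fuel` successive orientations starting from card
def zchain : Nat → List (List Int) → List (Nat × Nat)
  | 0, _ => []
  | fuel + 1, card => zerosOf card (List.range 8) ++ zchain fuel (rotate_90A card 1)

lemma zip_append_drop {α β : Type} : ∀ (a b : List α) (c : List β),
    (a ++ b).zip c = a.zip c ++ b.zip (c.drop a.length) := by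
  intro a
  induction a with
  | nil => intro b c; simp
  | cons x a ih =>
    intro b c
    cases c with
    | nil => simp
    | cons y c => simp [ih]

lemma fill_cons (box : List (List String)) (p : (Nat × Nat) × Char) (l : List ((Nat × Nat) × Char)) :
    fill box (p :: l) = fill (setCell box p.1.1 p.1.2 (String.mk [p.2])) l := rfl

lemma fill_append (box : List (List String)) (l₁ l₂ : List ((Nat × Nat) × Char)) :
    fill box (l₁ ++ l₂) = fill (fill box l₁) l₂ := List.foldl_append

lemma row_spec (cx : List Int) (msg : List Char) (x : Nat) :
    ∀ (ys : List Nat) (i : Nat) (box : List (List String)), i < msg.length →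
    aRow cx msg x ys i box =
      (min (i + (zrow cx ys).length) msg.length,
       fill box (((zrow cx ys).map (fun y => ((x, y) : Nat × Nat))).zip (msg.drop i)),
       decide (msg.length ≤ i + (zrow cx ys).length)) := by
  intro ys
  induction ys with
  | nil =>
    intro i box h
    simp [aRow, zrow, fill]
    omega
  | cons y ys ih =>
    intro i box h
    have hdrop : msg.drop i = msg[i] :: msg.drop (i + 1) := (List.getElem_cons_drop h).symm
    have hgetD : msg.getD i ' ' = msg[i] := List.getD_eq_getElem msg ' ' h
    by_cases hz : (cx.getD y 0 == 0) = true
    · have hz16 : zrow cx (y :: ys) = y :: zrow cx ys := by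
        unfold zrow; exact List.filter_cons_of_pos hz
      by_cases hend : i + 1 = msg.length
      · have hb : (i + 1 == msg.length) = true := by simp [hend]
        have hnil : msg.drop (i + 1) = [] := List.drop_eq_nil_of_le (by omega)
        simp only [aRow, hz, hb, if_true]
        rw [hz16]
        simp only [List.map_cons, hdrop, List.zip_cons_cons, fill_cons, hgetD, List.length_cons,
          hnil, List.zip_nil_right]
        simp only [Prod.mk.injEq]
        exact ⟨by omega, by simp [fill], by simp; omega⟩
      · have hlt : i + 1 < msg.length := by omega
        have hb : (i + 1 == msg.length) = false := by simp [hend]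
        simp only [aRow, hz, hb, if_true, Bool.false_eq_true, if_false]
        rw [hz16, ih (i + 1) _ hlt]
        simp only [List.map_cons, hdrop, List.zip_cons_cons, fill_cons, hgetD, List.length_cons]
        simp only [Prod.mk.injEq]
        exact ⟨by omega, by trivial, by simp; omega⟩
    · have hz16 : zrow cx (y :: ys) = zrow cx ys := by
        unfold zrow; exact List.filter_cons_of_neg (by simpa using hz)
      simp only [aRow, hz, Bool.false_eq_true, if_false]
      rw [hz16]
      exact ih i box h

lemma rows_spec (card : List (List Int)) (msg : List Char) :
    ∀ (xs : List Nat) (i : Nat) (box : List (List String)), i < msg.length →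
    aRows card msg xs i box =
      (min (i + (zerosOf card xs).length) msg.length,
       fill box ((zerosOf card xs).zip (msg.drop i)),
       decide (msg.length ≤ i + (zerosOf card xs).length)) := by
  intro xs
  induction xs with
  | nil =>
    intro i box h
    simp [aRows, zerosOf, fill]
    omega
  | cons x xs ih =>
    intro i box h
    have hni : ¬ (msg.length ≤ i) := by omega
    have hsplit : zerosOf card (x :: xs) =
        (zrow (card.getD x []) (List.range 8)).map (fun y => ((x, y) : Nat × Nat)) ++
          zerosOf card xs := by
      simp [zerosOf]
    simp only [aRows, hni, if_false]
    rw [row_spec (card.getD x []) msg x (List.range 8) i box h, hsplit]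
    by_cases hc : msg.length ≤ i + (zrow (card.getD x []) (List.range 8)).length
    · have hd : decide (msg.length ≤ i + (zrow (card.getD x []) (List.range 8)).length) = true :=
        decide_eq_true hc
      simp only [hd]
      have hnil : (msg.drop i).drop
          ((zrow (card.getD x []) (List.range 8)).map (fun y => ((x, y) : Nat × Nat))).length = [] := by
        rw [List.drop_drop]
        apply List.drop_eq_nil_of_le
        rw [List.length_map]
        omega
      rw [zip_append_drop, hnil, List.zip_nil_right, List.append_nil]
      simp only [Prod.mk.injEq, List.length_append, List.length_map]
      exact ⟨by omega, by trivial, (decide_eq_true (by omega)).symm⟩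
    · have hd : decide (msg.length ≤ i + (zrow (card.getD x []) (List.range 8)).length) = false :=
        decide_eq_false hc
      simp only [hd]
      have hmin : min (i + (zrow (card.getD x []) (List.range 8)).length) msg.length
          = i + (zrow (card.getD x []) (List.range 8)).length := by omega
      rw [hmin, ih _ _ (by omega)]
      rw [zip_append_drop, fill_append, List.drop_drop]
      simp only [Prod.mk.injEq, List.length_append, List.length_map]
      exact ⟨by omega, by trivial, by rw [Nat.add_assoc]⟩
    
lemma loop_spec (msg : List Char) :
    ∀ (fuel r : Nat) (card : List (List Int)) (i : Nat) (box : List (List String)),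
    r + fuel = 4 → 0 < fuel → i < msg.length →
    aLoop msg fuel card i r box = fill box ((zchain fuel card).zip (msg.drop i)) := by
  intro fuel
  induction fuel with
  | zero => intro r card i box _ hf _; omega
  | succ fuel ih =>
    intro r card i box hr _ h
    simp only [aLoop, zchain]
    rw [rows_spec card msg (List.range 8) i box h]
    by_cases hc : msg.length ≤ i + (zerosOf card (List.range 8)).length
    · have hd : decide (msg.length ≤ i + (zerosOf card (List.range 8)).length) = true :=
        decide_eq_true hc
      simp only [hd]
      have hnil : (msg.drop i).drop (zerosOf card (List.range 8)).length = [] := by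
        rw [List.drop_drop]
        apply List.drop_eq_nil_of_le
        omega
      rw [zip_append_drop, hnil, List.zip_nil_right, List.append_nil]
    · have hd : decide (msg.length ≤ i + (zerosOf card (List.range 8)).length) = false :=
        decide_eq_false hc
      simp only [hd]
      have hmin : min (i + (zerosOf card (List.range 8)).length) msg.length
          = i + (zerosOf card (List.range 8)).length := by omega
      rw [hmin, zip_append_drop, fill_append]
      by_cases hr4 : r + 1 = 4
      · have hf0 : fuel = 0 := by omega
        have hb : (r + 1 == 4) = true := by simp [hr4]
        simp [hb, hf0, zchain, fill]
      · have hb : (r + 1 == 4) = false := by simp; omega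
        simp only [hb, Bool.false_eq_true, if_false]
        rw [ih (r + 1) (rotate_90A card 1) _ _ (by omega) (by omega) (by omega)]
        rw [List.drop_drop, Nat.add_comm]

set_option maxRecDepth 100000 in
lemma posB_eq : posB = zchain 4 keyCard := by decide

-- ===== VERDICT (by name: the statement is the Claim_ definition above) =====
theorem insert_message_spec : Claim_equal_insert_message := by
  intro message box _ _
  unfold Spec_insert_message insert_message insert_message_alt
  have h1 : 0 < (message.toList ++ ['✸']).length := by simp
  rw [loop_spec (message.toList ++ ['✸']) 4 0 keyCard 0 box rfl (by norm_num) h1]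
  rw [← posB_eq]
  rfl
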